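-- pv_equiv track=rewrite | github.com/dongyang2/time_based_data | arima/modeling.py | difference_cal
-- ===== SOURCE A (Python) =====
-- def difference_cal(li, d):
--     n = len(li)
--     if d >= n:
--         return False
--     if d == 0:
--         return li
--
--     i = 1
--     arr = []
--     while i < n:
--         arr.append(li[i] - li[i - 1])
--         i += 1
--     return difference_cal(arr, d - 1)
-- ===== SOURCE B (Python) =====
-- def difference_cal(li, d):
--     n = len(li)
--     if d >= n:
--         return False
--     if d == 0:
--         return li
--     arr = li
--     for _ in range(d):
--         arr = [b - a for a, b in zip(arr, arr[1:])]
--     return arr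
-- ===== Notes on version B (the rewrite author's own statement) =====
-- stated objective: simpler
-- what changed: Replaces the recursion on the decremented d (with a hand-rolled index/while differencing loop and re-checked guards at every level) by a single flat loop that applies one zip-based first-differencing comprehension d times after checking the guards once.
-- outside the precondition, e.g. on difference_cal([], 0): A returns False, B returns False; on difference_cal([1, 2], 5): A returns False, B returns False
import Mathlib
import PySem

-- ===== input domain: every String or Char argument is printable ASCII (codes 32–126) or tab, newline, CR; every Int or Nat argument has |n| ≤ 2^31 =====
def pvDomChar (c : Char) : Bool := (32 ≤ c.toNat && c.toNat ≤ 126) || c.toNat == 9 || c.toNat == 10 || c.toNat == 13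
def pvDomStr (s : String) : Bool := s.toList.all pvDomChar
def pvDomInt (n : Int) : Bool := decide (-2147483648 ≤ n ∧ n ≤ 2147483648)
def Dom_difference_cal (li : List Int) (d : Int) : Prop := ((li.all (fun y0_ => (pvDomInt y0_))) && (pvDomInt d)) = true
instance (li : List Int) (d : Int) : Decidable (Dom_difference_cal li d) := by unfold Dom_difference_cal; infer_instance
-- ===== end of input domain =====

-- B replaces A's recursion on d (hand-rolled while-loop differencing each level) by one flat
-- loop applying a zip-based first-difference step d times; same cost, simpler decomposition.


-- ===== PORT A =====
-- the while loop: i = 1; arr = []; while i < n: arr.append(li[i] - li[i-1]); i += 1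
def aWhile (li arr : List Int) (i : Nat) : List Int :=
  if i < li.length then
    aWhile li (arr ++ [li.getD i 0 - li.getD (i - 1) 0]) (i + 1)
  else arr
termination_by li.length - i

def difference_cal (li : List Int) (d : Int) : Option (List Int) :=
  let n : Int := li.length
  if d ≥ n then none            -- return False  (no list value: encoded as none)
  else if d = 0 then some li
  else if d < 0 then none       -- totality guard: Python A recurses forever (RecursionError) here
  else difference_cal (aWhile li [] 1) (d - 1)
termination_by d.toNat
decreasing_by omega

-- ===== PORT B =====
-- arr = [b - a for a, b in zip(arr, arr[1:])]
def bStep (arr : List Int) : List Int :=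
  (arr.zip (arr.drop 1)).map (fun p => p.2 - p.1)

def difference_cal_alt (li : List Int) (d : Int) : Option (List Int) :=
  if d ≥ (li.length : Int) then none
  else if d = 0 then some li
  else some ((List.range d.toNat).foldl (fun arr _ => bStep arr) li)

-- ===== PRECONDITION & SPEC =====
-- Pre_ excludes negative d, where Python A raises RecursionError, and d >= len(li), where
-- A (and B) return the sentinel False, which is not a value of the declared list type.
def Pre_difference_cal (li : List Int) (d : Int) : Prop := 0 ≤ d ∧ d < (li.length : Int)
instance (li : List Int) (d : Int) : Decidable (Pre_difference_cal li d) := by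
  unfold Pre_difference_cal; infer_instance
def pvWitness_difference_cal : List Int × Int := ([1, 2, 4, 8], 2)

def Spec_difference_cal (li : List Int) (d : Int) (out : Option (List Int)) : Prop :=
  out = difference_cal_alt li d
instance (li : List Int) (d : Int) (out : Option (List Int)) : Decidable (Spec_difference_cal li d out) := by
  unfold Spec_difference_cal; infer_instance

-- ===== CLAIM (what is proved, stated in full; the proofs are below) =====
def Claim_equal_difference_cal : Prop := ∀ (li : List Int) (d : Int),
  Dom_difference_cal li d → Pre_difference_cal li d →
  Spec_difference_cal li d (difference_cal li d)

-- ===== LEMMAS AND PROOFS =====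
lemma bStep_cons_cons (a b : Int) (l : List Int) :
    bStep (a :: b :: l) = (b - a) :: bStep (b :: l) := by
  simp [bStep]

lemma bStep_length (l : List Int) : (bStep l).length = l.length - 1 := by
  simp [bStep]

lemma aWhile_eq_fuel (li : List Int) : ∀ (fuel i : Nat) (arr : List Int),
    li.length - i ≤ fuel → 1 ≤ i →
    aWhile li arr i = arr ++ bStep (li.drop (i - 1)) := by
  intro fuel
  induction fuel with
  | zero =>
    intro i arr hf hi
    have h : ¬ i < li.length := by omega
    rw [aWhile]
    simp only [if_neg h]
    have : bStep (li.drop (i - 1)) = [] := by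
      cases hdl : li.drop (i - 1) with
      | nil => simp [bStep]
      | cons a t =>
        have hl : (li.drop (i - 1)).length ≤ 1 := by simp; omega
        rw [hdl] at hl
        simp at hl
        subst hl
        simp [bStep]
    rw [this, List.append_nil]
  | succ fuel ih =>
    intro i arr hf hi
    rw [aWhile]
    by_cases h : i < li.length
    · simp only [if_pos h]
      rw [ih (i + 1) _ (by omega) (by omega)]
      have hdrop : li.drop (i - 1) = li.getD (i - 1) 0 :: li.getD i 0 :: li.drop (i + 1) := by
        have h1 : i - 1 < li.length := by omega
        rw [List.getD_eq_getElem _ _ h1, List.getD_eq_getElem _ _ h]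
        rw [List.drop_eq_getElem_cons h1]
        congr 1
        have : i - 1 + 1 = i := by omega
        rw [this, List.drop_eq_getElem_cons h]
      rw [hdrop, bStep_cons_cons]
      have : li.drop ((i + 1) - 1) = li.getD i 0 :: li.drop (i + 1) := by
        simp only [Nat.add_sub_cancel]
        rw [List.getD_eq_getElem _ _ h, List.drop_eq_getElem_cons h]
      rw [this]
      simp
    · simp only [if_neg h]
      have : bStep (li.drop (i - 1)) = [] := by
        have hl : (li.drop (i - 1)).length ≤ 1 := by
          simp; omega
        cases hdl : li.drop (i - 1) with
        | nil => simp [bStep]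
        | cons a t =>
          rw [hdl] at hl
          simp at hl
          subst hl
          simp [bStep]
      rw [this, List.append_nil]

lemma foldl_range_succ {α : Type} (f : α → α) (k : Nat) (x : α) :
    (List.range (k + 1)).foldl (fun a _ => f a) x = (List.range k).foldl (fun a _ => f a) (f x) := by
  rw [List.range_succ_eq_map]
  simp [List.foldl_map]

lemma main_lemma : ∀ (k : Nat) (li : List Int),
    difference_cal li (k : Int) = difference_cal_alt li (k : Int) := by
  intro k
  induction k with
  | zero =>
    intro li
    rw [difference_cal, difference_cal_alt]
    by_cases h : (0 : Int) ≥ (li.length : Int)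
    · simp [h]
    · simp [h]
  | succ k ih =>
    intro li
    rw [difference_cal, difference_cal_alt]
    by_cases h : ((k : Int) + 1) ≥ (li.length : Int)
    · push_cast
      simp [h]
    · push_cast
      simp only [if_neg h]
      have hk1 : ¬ ((k : Int) + 1 = 0) := by omega
      have hneg : ¬ ((k : Int) + 1 < 0) := by omega
      simp only [if_neg hk1, if_neg hneg]
      have hcast : (k : Int) + 1 - 1 = (k : Int) := by omega
      rw [hcast, aWhile_eq_fuel li li.length 1 [] (by omega) (by omega)]
      simp only [Nat.sub_self, List.drop_zero, List.nil_append]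
      rw [ih (bStep li)]
      rw [difference_cal_alt]
      have hlen : (bStep li).length = li.length - 1 := bStep_length li
      have hlt : ¬ ((k : Int) ≥ ((bStep li).length : Int)) := by
        rw [hlen]
        have : 1 ≤ li.length := by omega
        push_cast [this]
        omega
      simp only [if_neg hlt]
      by_cases hk0 : k = 0
      · subst hk0
        simp [Int.toNat_one, List.range_succ, List.range_zero]
      · have : ¬ ((k : Int) = 0) := by omega
        simp only [if_neg this]
        congr 1
        have ht : ((k : Int) + 1).toNat = k + 1 := by omega
        have ht2 : ((k : Int)).toNat = k := by omega
        rw [ht, ht2, foldl_range_succ]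

-- ===== VERDICT (by name: the statement is the Claim_ definition above) =====
theorem difference_cal_spec : Claim_equal_difference_cal := by
  intro li d _ hpre
  unfold Spec_difference_cal
  have : d = ((d.toNat : Nat) : Int) := by
    unfold Pre_difference_cal at hpre; omega
  rw [this]
  exact main_lemma d.toNat li
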